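-- pv_equiv track=rewrite | github.com/cirosantilli/project-euler-solvers | solvers/690.py | partitions_upto
-- ===== SOURCE A (Python) =====
-- MOD = 1_000_000_007
--
-- def partitions_upto(n: int) -> list[int]:
--     """Partition numbers p(0..n) modulo MOD (P(x) coefficients)."""
--     p = [0] * (n + 1)
--     p[0] = 1
--     for k in range(1, n + 1):
--         for i in range(k, n + 1):
--             p[i] += p[i - k]
--             if p[i] >= MOD:
--                 p[i] -= MOD
--     return p
-- ===== SOURCE B (Python) =====
-- MOD = 1_000_000_007
--
-- def partitions_upto(n: int) -> list[int]:
--     """Partition numbers p(0..n) modulo MOD (P(x) coefficients).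
--
--     Instead of A's element-wise in-place shifted adds (p[i] += p[i-k]),
--     each multiplication by 1/(1-x^k) is done block-wise: the array is cut
--     into chunks of length k and a running chunk accumulator (a vectorised
--     prefix sum modulo MOD over the chunks) is written back via slice
--     assignment."""
--     p = [0] * (n + 1)
--     p[0] = 1
--     for k in range(1, n + 1):
--         acc = [0] * k
--         for s in range(0, n + 1, k):
--             acc = [(x + y) % MOD for x, y in zip(acc, p[s:s + k])]
--             p[s:s + k] = acc
--     return p
-- ===== Notes on version B (the rewrite author's own statement) =====
-- stated objective: alternative
-- what changed: A multiplies by each 1/(1-x^k) via element-wise in-place shifted adds p[i] += p[i-k] with a conditional subtract; B instead cuts the array into length-k blocks and folds a running block accumulator over them (acc = [(x+y)%MOD for x,y in zip(acc, p[s:s+k])], written back by slice assignment), i.e. a chunk-wise vectorised prefix sum per k instead of an element-wise scan.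
import Mathlib
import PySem

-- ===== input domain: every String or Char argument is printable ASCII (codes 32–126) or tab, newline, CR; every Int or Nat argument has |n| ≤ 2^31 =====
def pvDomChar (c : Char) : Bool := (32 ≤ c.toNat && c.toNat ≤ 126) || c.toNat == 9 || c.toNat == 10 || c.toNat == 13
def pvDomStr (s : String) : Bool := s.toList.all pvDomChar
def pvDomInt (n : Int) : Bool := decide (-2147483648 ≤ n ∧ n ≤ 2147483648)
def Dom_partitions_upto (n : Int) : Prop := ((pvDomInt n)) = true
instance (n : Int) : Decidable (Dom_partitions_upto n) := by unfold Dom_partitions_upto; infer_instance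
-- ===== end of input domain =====

-- B replaces A's in-place shifted adds (p[i] += p[i-k], conditional subtract) by an
-- independent running prefix sum (mod MOD) along each residue class r modulo k:
-- a different traversal of the same product of geometric series; same asymptotic cost.


def pvMOD : Int := 1000000007

-- Python lists are mutable O(1)-indexed sequences: both ports model them as Array Int.
-- pvGet/pvSet are p[i] / p[i] = v, exact for the in-range non-negative indices both
-- programs use (under Pre_ every access is in range; Python raises outside).
def pvGet (p : Array Int) (i : Int) : Int := p.getD i.toNat 0

def pvSet (p : Array Int) (i : Int) (v : Int) : Array Int := p.setIfInBounds i.toNat v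

-- ===== PORT A =====
-- body of A's inner loop: p[i] += p[i-k]; if p[i] >= MOD: p[i] -= MOD
def pvAbody (k : Int) (p : Array Int) (i : Int) : Array Int :=
  let p1 := pvSet p i (pvGet p i + pvGet p (i - k))
  if pvMOD ≤ pvGet p1 i then pvSet p1 i (pvGet p1 i - pvMOD) else p1

-- A's inner loop: for i in range(k, n+1)
def pvAstep (n k : Int) (p : Array Int) : Array Int :=
  (PySem.List.pyRange k (n + 1) 1).foldl (pvAbody k) p

def partitions_upto (n : Int) : List Int :=
  ((PySem.List.pyRange 1 (n + 1) 1).foldl (fun p k => pvAstep n k p)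
    (pvSet (Array.replicate (n + 1).toNat (0 : Int)) 0 1)).toList

-- ===== PORT B =====
-- Python slice read p[s:s+k] (0 <= s, 0 <= k; the end is clamped exactly like Python's)
def pvChunk (p : Array Int) (s k : Int) : List Int :=
  (p.extract s.toNat (s + k).toNat).toList

-- Python slice assignment p[s:s+len(xs)] = xs (equal lengths), written cell by cell
def pvSetSlice (p : Array Int) (s : Nat) (xs : List Int) : Array Int :=
  match xs with
  | [] => p
  | x :: t => pvSetSlice (p.setIfInBounds s x) (s + 1) t

-- body of B's block loop: acc = [(x + y) % MOD for x, y in zip(acc, p[s:s+k])]; p[s:s+k] = acc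
def pvBbody (k : Int) (st : List Int × Array Int) (s : Int) : List Int × Array Int :=
  let acc := (st.1.zip (pvChunk st.2 s k)).map (fun xy => PySem.Int.mod (xy.1 + xy.2) pvMOD)
  (acc, pvSetSlice st.2 s.toNat acc)

-- B's loop over the blocks of one k-round: acc = [0]*k; for s in range(0, n+1, k)
def pvBstep (n k : Int) (p : Array Int) : Array Int :=
  ((PySem.List.pyRange 0 (n + 1) k).foldl (pvBbody k) (List.replicate k.toNat (0 : Int), p)).2

def partitions_upto_alt (n : Int) : List Int :=
  ((PySem.List.pyRange 1 (n + 1) 1).foldl (fun p k => pvBstep n k p)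
    (pvSet (Array.replicate (n + 1).toNat (0 : Int)) 0 1)).toList

-- ===== PRECONDITION & SPEC =====
-- For negative n both A and B allocate an empty list and raise IndexError writing its first cell.
def Pre_partitions_upto (n : Int) : Prop := 0 ≤ n
instance (n : Int) : Decidable (Pre_partitions_upto n) := by unfold Pre_partitions_upto; infer_instance
def pvWitness_partitions_upto : Int := 6

def Spec_partitions_upto (n : Int) (out : List Int) : Prop := out = partitions_upto_alt n
instance (n : Int) (out : List Int) : Decidable (Spec_partitions_upto n out) := by unfold Spec_partitions_upto; infer_instance

-- ===== CLAIM (what is proved, stated in full; the proofs are below) =====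
def Claim_equal_partitions_upto : Prop := ∀ (n : Int), Dom_partitions_upto n → Pre_partitions_upto n → Spec_partitions_upto n (partitions_upto n)

-- ===== LEMMAS AND PROOFS =====

-- the common specification of one k-round of either program:
-- pvQ k p i = the value the round writes at index i (a prefix sum mod MOD along i, i-k, i-2k, …)
def pvQ (k : Int) (p : Array Int) (i : Int) : Int :=
  if _h : 1 ≤ k ∧ k ≤ i then (pvQ k p (i - k) + p.getD i.toNat 0) % pvMOD
  else p.getD i.toNat 0
termination_by i.toNat
decreasing_by omega

def pvStep (k : Int) (p : Array Int) : Array Int :=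
  ((PySem.List.pyRange 0 (p.size : Int) 1).map (fun i => pvQ k p i)).toArray

-- every cell (and the out-of-range default 0) lies in [0, MOD)
def pvBnd (p : Array Int) : Prop := ∀ j : Nat, 0 ≤ p.getD j 0 ∧ p.getD j 0 < pvMOD

lemma pvQ_pos (k : Int) (p : Array Int) (i : Int) (h1 : 1 ≤ k) (h2 : k ≤ i) :
    pvQ k p i = (pvQ k p (i - k) + p.getD i.toNat 0) % pvMOD := by
  rw [pvQ, dif_pos ⟨h1, h2⟩]

lemma pvQ_base (k : Int) (p : Array Int) (i : Int) (h : ¬(1 ≤ k ∧ k ≤ i)) :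
    pvQ k p i = p.getD i.toNat 0 := by
  rw [pvQ, dif_neg h]

lemma pvQ_bnd (k : Int) (p : Array Int) (i : Int) (hb : pvBnd p) :
    0 ≤ pvQ k p i ∧ pvQ k p i < pvMOD := by
  by_cases h : 1 ≤ k ∧ k ≤ i
  · rw [pvQ_pos k p i h.1 h.2]
    constructor
    · exact Int.emod_nonneg _ (by norm_num [pvMOD])
    · exact Int.emod_lt_of_pos _ (by norm_num [pvMOD])
  · rw [pvQ_base k p i h]; exact hb i.toNat

lemma pvArrGetD_pos (a : Array Int) (j : Nat) (h : j < a.size) : a.getD j 0 = a[j] := by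
  rw [Array.getD_eq_getD_getElem?, Array.getElem?_eq_getElem h, Option.getD_some]

lemma pvArrGetD_neg (a : Array Int) (j : Nat) (h : ¬ j < a.size) : a.getD j 0 = 0 := by
  rw [Array.getD_eq_getD_getElem?, Array.getElem?_eq_none (by omega), Option.getD_none]

lemma pvGetD_set (a : Array Int) (i j : Nat) (v : Int) (hi : i < a.size) :
    (a.setIfInBounds i v).getD j 0 = if j = i then v else a.getD j 0 := by
  rw [Array.getD_eq_getD_getElem?, Array.getElem?_setIfInBounds]
  by_cases h1 : i = j
  · rw [if_pos h1, if_pos hi, if_pos h1.symm, Option.getD_some]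
  · rw [if_neg h1, if_neg (fun h => h1 h.symm), Array.getD_eq_getD_getElem?]

lemma pvRange_cons (a b k : Int) (hk : 0 < k) (hab : a < b) :
    PySem.List.pyRange a b k = a :: PySem.List.pyRange (a + k) b k := by
  rw [PySem.List.pyRange_of_pos _ _ hk, PySem.List.pyRange_of_pos _ _ hk]
  by_cases h : a + k < b
  · have hN : ((b - a + k - 1) / k).toNat = ((b - (a + k) + k - 1) / k).toNat + 1 := by
      have : b - a + k - 1 = (b - (a + k) + k - 1) + 1 * k := by ring
      rw [this, Int.add_mul_ediv_right _ _ (by omega : k ≠ 0)]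
      have h0 : 0 ≤ (b - (a + k) + k - 1) / k :=
        Int.ediv_nonneg (by omega) (by omega)
      omega
    rw [if_pos hab, if_pos h, hN, List.range_succ_eq_map]
    simp only [List.map_cons, List.map_map]
    refine List.cons_eq_cons.mpr ⟨by push_cast; ring, ?_⟩
    apply List.map_congr_left
    intro t _
    simp only [Function.comp, Nat.succ_eq_add_one]
    push_cast
    ring
  · have hN : ((b - a + k - 1) / k).toNat = 1 := by
      have h1 : (b - a + k - 1) / k = 1 := by
        rw [Int.ediv_eq_iff_of_pos hk] <;> omega
      omega
    rw [if_pos hab, if_neg h, hN]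
    simp

lemma pvRange_nil (a b k : Int) (hk : 0 < k) (h : b ≤ a) :
    PySem.List.pyRange a b k = [] := by
  rw [PySem.List.pyRange_of_pos _ _ hk, if_neg (by omega)]
  simp

lemma pvStep_size (k : Int) (p : Array Int) : (pvStep k p).size = p.size := by
  simp [pvStep, PySem.List.length_pyRange_one]

lemma pvStep_getD (k : Int) (p : Array Int) (j : Nat) (hj : j < p.size) :
    (pvStep k p).getD j 0 = pvQ k p (j : Int) := by
  rw [pvStep, Array.getD_eq_getD_getElem?, List.getElem?_toArray,
    List.getElem?_eq_getElem (by simp [PySem.List.length_pyRange_one]; omega),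
    Option.getD_some, List.getElem_map, PySem.List.getElem_pyRange_one]
  simp

lemma pvStep_bnd (k : Int) (p : Array Int) (hb : pvBnd p) : pvBnd (pvStep k p) := by
  intro j
  by_cases hj : j < p.size
  · rw [pvStep_getD k p j hj]; exact pvQ_bnd k p _ hb
  · rw [pvArrGetD_neg _ j (by rw [pvStep_size]; omega)]
    constructor <;> norm_num [pvMOD]

lemma pvNorm_eq_mod (v : Int) (h1 : 0 ≤ v) (h2 : v < 2 * pvMOD) :
    (if pvMOD ≤ v then v - pvMOD else v) = v % pvMOD := by
  unfold pvMOD at *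
  split_ifs <;> omega

-- ===== A's inner loop computes pvQ =====
lemma pvA_loop (k m : Int) (p s : Array Int) (hk : 1 ≤ k) (hkm : k ≤ m)
    (hlen : s.size = p.size) (hb : pvBnd p)
    (hchar : ∀ j : Nat, j < p.size →
      s.getD j 0 = if (j : Int) < m then pvQ k p (j : Int) else p.getD j 0) :
    (PySem.List.pyRange m (p.size : Int) 1).foldl (pvAbody k) s = pvStep k p := by
  by_cases hend : (p.size : Int) ≤ m
  · rw [PySem.List.pyRange_one_eq_nil hend, List.foldl_nil]
    apply Array.ext (by rw [hlen, pvStep_size])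
    intro j hj1 hj2
    have hj : j < p.size := by omega
    rw [← pvArrGetD_pos s j hj1, ← pvArrGetD_pos _ j hj2,
      pvStep_getD k p j hj, hchar j hj, if_pos (by omega)]
  · push_neg at hend
    rw [PySem.List.pyRange_one_cons hend, List.foldl_cons]
    have hm0 : 0 ≤ m := by omega
    have hmlt : m.toNat < p.size := by omega
    have hmlt' : m.toNat < s.size := by omega
    -- compute the body at index m
    have hsm : pvGet s m = p.getD m.toNat 0 := by
      rw [pvGet, hchar m.toNat hmlt, if_neg (by omega)]
    have hsmk : pvGet s (m - k) = pvQ k p (m - k) := by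
      rw [pvGet, hchar (m - k).toNat (by omega)]
      rw [if_pos (by omega)]
      congr 1
      omega
    set v := p.getD m.toNat 0 + pvQ k p (m - k) with hv
    have hbody : pvAbody k s m = s.setIfInBounds m.toNat (pvQ k p m) := by
      have hval : (if pvMOD ≤ v then v - pvMOD else v) = pvQ k p m := by
        rw [pvNorm_eq_mod v
          (by have := hb m.toNat; have := pvQ_bnd k p (m - k) hb; omega)
          (by have := hb m.toNat; have := pvQ_bnd k p (m - k) hb; omega)]
        rw [pvQ_pos k p m hk hkm, add_comm]
      rw [pvAbody]
      simp only [hsm, hsmk, ← hv]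
      rw [pvSet, pvGet, pvGetD_set s m.toNat m.toNat v hmlt', if_pos rfl]
      split_ifs with hc
      · rw [pvSet, Array.setIfInBounds_setIfInBounds]
        rw [← hval, if_pos hc]
      · rw [← hval, if_neg hc]
    rw [hbody]
    exact pvA_loop k (m + 1) p _ hk (by omega) (by simpa using hlen) hb (by
      intro j hj
      rw [pvGetD_set s m.toNat j _ hmlt']
      by_cases h1 : j = m.toNat
      · rw [if_pos h1, if_pos (show ((j : Int)) < m + 1 by omega)]
        congr 1
        omega
      · rw [if_neg h1]
        by_cases h2 : (j : Int) < m + 1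
        · rw [if_pos h2, hchar j hj, if_pos (by omega)]
        · rw [if_neg h2, hchar j hj, if_neg (by omega)])
termination_by ((p.size : Int) - m).toNat
decreasing_by omega

-- A's one k-round equals pvStep
lemma pvAstep_eq (n k : Int) (p : Array Int) (hk : 1 ≤ k) (hb : pvBnd p)
    (hn : (p.size : Int) = n + 1) : pvAstep n k p = pvStep k p := by
  rw [pvAstep, ← hn]
  exact pvA_loop k k p p hk le_rfl rfl hb (by
    intro j hj
    by_cases h : (j : Int) < k
    · rw [if_pos h, pvQ_base k p _ (by omega), Int.toNat_natCast]
    · rw [if_neg h])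

-- ===== B's slice-assignment and block loop =====
lemma pvSetSlice_size (xs : List Int) (p : Array Int) (s : Nat) :
    (pvSetSlice p s xs).size = p.size := by
  induction xs generalizing p s with
  | nil => rfl
  | cons x t ih => rw [pvSetSlice, ih, Array.size_setIfInBounds]

lemma pvSetSlice_getD (xs : List Int) (p : Array Int) (s j : Nat) :
    (pvSetSlice p s xs).getD j 0 =
      if s ≤ j ∧ j < s + xs.length ∧ j < p.size then xs.getD (j - s) 0 else p.getD j 0 := by
  induction xs generalizing p s with
  | nil => rw [pvSetSlice, if_neg (by rintro ⟨h1, h2, h3⟩; simp at h2; omega)]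
  | cons x t ih =>
    rw [pvSetSlice, ih]
    simp only [Array.size_setIfInBounds, List.length_cons]
    by_cases hsz : s < p.size
    · by_cases hjs : j = s
      · subst hjs
        rw [if_neg (by omega), if_pos ⟨le_rfl, by omega, hsz⟩,
          pvGetD_set _ _ _ _ hsz, if_pos rfl, Nat.sub_self, List.getD_cons_zero]
      · by_cases hc : s + 1 ≤ j ∧ j < s + 1 + t.length ∧ j < p.size
        · rw [if_pos hc, if_pos ⟨by omega, by omega, hc.2.2⟩,
            show j - s = (j - (s + 1)) + 1 by omega, List.getD_cons_succ]
        · rw [if_neg hc, if_neg (by rintro ⟨h1, h2, h3⟩; exact hc ⟨by omega, by omega, h3⟩),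
            pvGetD_set _ _ _ _ hsz, if_neg hjs]
    · rw [Array.setIfInBounds_eq_of_size_le (by omega),
        if_neg (by omega), if_neg (by omega)]

lemma pvChunk_len (p : Array Int) (s k : Int) (hs : 0 ≤ s) (hk : 0 ≤ k)
    (hss : s ≤ (p.size : Int)) :
    ((pvChunk p s k).length : Int) = min (s + k) (p.size : Int) - s := by
  rw [pvChunk, Array.length_toList, Array.size_extract]
  omega

lemma pvChunk_getD (p : Array Int) (s k : Int) (t : Nat)
    (ht : t < (pvChunk p s k).length) :
    (pvChunk p s k).getD t 0 = p.getD (s.toNat + t) 0 := by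
  have hts : t < (p.extract s.toNat (s + k).toNat).size := by
    rw [pvChunk, Array.length_toList] at ht
    exact ht
  have hlt : s.toNat + t < p.size := by
    have := hts
    rw [Array.size_extract] at this
    omega
  rw [pvChunk, List.getD_eq_getElem _ 0 (by rw [Array.length_toList]; exact hts), Array.getElem_toList,
    Array.getElem_extract hts, pvArrGetD_pos p _ hlt]

lemma pvB_loop (k s : Int) (p pc : Array Int) (acc : List Int)
    (hk : 1 ≤ k) (hs0 : 0 ≤ s)
    (hlen : pc.size = p.size) (hb : pvBnd p)
    (hchar : ∀ j : Nat, j < p.size →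
      pc.getD j 0 = if (j : Int) < s then pvQ k p (j : Int) else p.getD j 0)
    (hacc : (s = 0 ∧ acc = List.replicate k.toNat 0) ∨
            (k ≤ s ∧ (acc.length : Int) = min k ((p.size : Int) - (s - k)) ∧
             ∀ t : Nat, t < acc.length → acc.getD t 0 = pvQ k p (s - k + t))) :
    ((PySem.List.pyRange s (p.size : Int) k).foldl (pvBbody k) (acc, pc)).2 = pvStep k p := by
  by_cases hend : (p.size : Int) ≤ s
  · rw [pvRange_nil s _ k (by omega) hend, List.foldl_nil]
    show pc = pvStep k p
    apply Array.ext (by rw [hlen, pvStep_size])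
    intro j hj1 hj2
    have hj : j < p.size := by omega
    rw [← pvArrGetD_pos pc j hj1, ← pvArrGetD_pos _ j hj2,
      pvStep_getD k p j hj, hchar j hj, if_pos (by omega)]
  · push_neg at hend
    rw [pvRange_cons s _ k (by omega) hend, List.foldl_cons]
    have hchunklen : ((pvChunk pc s k).length : Int) = min (s + k) (p.size : Int) - s := by
      rw [pvChunk_len pc s k hs0 (by omega) (by omega), hlen]
    have hchunkget : ∀ t : Nat, t < (pvChunk pc s k).length →
        (pvChunk pc s k).getD t 0 = p.getD (s.toNat + t) 0 := by
      intro t ht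
      rw [pvChunk_getD pc s k t ht, hchar (s.toNat + t) (by omega), if_neg (by omega)]
    have haccge : (pvChunk pc s k).length ≤ acc.length := by
      rcases hacc with ⟨hs, ha⟩ | ⟨hs, ha, _⟩
      · rw [ha, List.length_replicate]; omega
      · omega
    set acc' := (acc.zip (pvChunk pc s k)).map
      (fun xy => PySem.Int.mod (xy.1 + xy.2) pvMOD) with hacc'
    have hacc'len : acc'.length = (pvChunk pc s k).length := by
      rw [hacc', List.length_map, List.length_zip]; omega
    have hacc'get : ∀ t : Nat, t < (pvChunk pc s k).length →
        acc'.getD t 0 = pvQ k p (s + t) := by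
      intro t ht
      have htz : t < (acc.zip (pvChunk pc s k)).length := by rw [List.length_zip]; omega
      rw [hacc', List.getD_eq_getElem _ 0 (by simpa using htz), List.getElem_map,
        List.getElem_zip, PySem.Int.mod_eq_emod_of_pos (by norm_num [pvMOD])]
      rcases hacc with ⟨hs, ha⟩ | ⟨hs, halen, hav⟩
      · -- first block: acc is all zeroes and pvQ is in its base case
        have h0 : acc[t] = 0 := by
          rw [← List.getD_eq_getElem acc 0 (by omega), ha,
            List.getD_eq_getElem _ 0 (by simp; omega), List.getElem_replicate]
        rw [h0, zero_add, ← List.getD_eq_getElem (pvChunk pc s k) 0 ht, hchunkget t ht,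
          pvQ_base k p _ (by omega)]
        have := hb (s.toNat + t)
        rw [Int.emod_eq_of_lt this.1 this.2]
        congr 1
        omega
      · -- later block: acc holds the pvQ values of the previous block
        have h1 : acc[t] = pvQ k p (s - k + t) := by
          rw [← List.getD_eq_getElem acc 0 (by omega)]; exact hav t (by omega)
        rw [h1, ← List.getD_eq_getElem (pvChunk pc s k) 0 ht, hchunkget t ht,
          pvQ_pos k p (s + t) hk (by omega),
          show s + (t : Int) - k = s - k + (t : Int) by ring,
          show ((s + (t : Int)).toNat) = s.toNat + t by omega]
    have hbody : pvBbody k (acc, pc) s = (acc', pvSetSlice pc s.toNat acc') := by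
      rw [pvBbody]
    rw [hbody]
    refine pvB_loop k (s + k) p (pvSetSlice pc s.toNat acc') acc' hk (by omega)
      (by rw [pvSetSlice_size, hlen]) hb ?_ ?_
    · intro j hj
      rw [pvSetSlice_getD acc' pc s.toNat j]
      by_cases hin : s.toNat ≤ j ∧ j < s.toNat + acc'.length ∧ j < pc.size
      · rw [if_pos hin, if_pos (by omega)]
        rw [hacc'get (j - s.toNat) (by omega)]
        congr 1
        omega
      · rw [if_neg hin, hchar j hj]
        by_cases hjs : (j : Int) < s
        · rw [if_pos hjs, if_pos (by omega)]
        · rw [if_neg hjs, if_neg (by omega)]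
    · refine Or.inr ⟨by omega, by rw [hacc'len]; omega, ?_⟩
      intro t ht
      rw [hacc'get t (by omega)]
      congr 1
      omega
termination_by ((p.size : Int) - s).toNat
decreasing_by omega

-- B's one k-round equals pvStep
lemma pvBstep_eq (n k : Int) (p : Array Int) (hk : 1 ≤ k) (hb : pvBnd p)
    (hn : (p.size : Int) = n + 1) : pvBstep n k p = pvStep k p := by
  rw [pvBstep, ← hn]
  exact pvB_loop k 0 p p (List.replicate k.toNat 0) hk le_rfl rfl hb
    (by intro j hj; rw [if_neg (by omega)])
    (Or.inl ⟨rfl, rfl⟩)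

-- the outer loop over k: the two programs stay equal round by round
lemma pvOuter (n m : Int) (p : Array Int) (hm : 1 ≤ m) (hb : pvBnd p)
    (hn : (p.size : Int) = n + 1) :
    (PySem.List.pyRange m (n + 1) 1).foldl (fun p k => pvAstep n k p) p =
    (PySem.List.pyRange m (n + 1) 1).foldl (fun p k => pvBstep n k p) p := by
  by_cases hend : n + 1 ≤ m
  · rw [PySem.List.pyRange_one_eq_nil hend]
    rfl
  · push_neg at hend
    rw [PySem.List.pyRange_one_cons hend, List.foldl_cons, List.foldl_cons]
    rw [pvAstep_eq n m p hm hb hn, pvBstep_eq n m p hm hb hn]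
    exact pvOuter n (m + 1) (pvStep m p) (by omega) (pvStep_bnd m p hb)
      (by rw [pvStep_size]; exact hn)
termination_by (n + 1 - m).toNat
decreasing_by omega

-- ===== VERDICT (by name: the statement is the Claim_ definition above) =====
theorem partitions_upto_spec : Claim_equal_partitions_upto := by
  intro n _ hpre
  unfold Spec_partitions_upto partitions_upto partitions_upto_alt
  have hpre' : (0 : Int) ≤ n := hpre
  set p0 := pvSet (Array.replicate (n + 1).toNat (0 : Int)) 0 1 with hp0
  have hsz : (n + 1).toNat = n.toNat + 1 := by omega
  have hp0sz : p0.size = (n + 1).toNat := by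
    rw [hp0, pvSet, Array.size_setIfInBounds, Array.size_replicate]
  have hb : pvBnd p0 := by
    intro j
    by_cases hj : j < p0.size
    · rw [hp0, pvSet] at hj ⊢
      rw [pvArrGetD_pos _ j hj, Array.getElem_setIfInBounds (by simpa using hj)]
      split_ifs
      · constructor <;> norm_num [pvMOD]
      · rw [Array.getElem_replicate]
        constructor <;> norm_num [pvMOD]
    · rw [pvArrGetD_neg _ j hj]
      constructor <;> norm_num [pvMOD]
  have hn : (p0.size : Int) = n + 1 := by
    rw [hp0sz]
    omega
  exact congrArg Array.toList (pvOuter n 1 p0 le_rfl hb hn)
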